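-- pv_equiv track=rewrite | github.com/wallaor/convert_to_vid | main/create_frame.py | form_frame_by_hex_set
-- ===== SOURCE A (Python) =====
-- def bytes_to_hex_color(byte):
--     out_int = byte*4
--     out_hex = hex(out_int)[2:]
--     if len(out_hex) == 1:
--         out_hex = "0" + out_hex
--     return out_hex
--
-- def form_frame_by_hex_set(width, height, hex_list):
--     colorMatrix = [[0 for x in range(width)] for y in range(height)]
--     offset = 0
--     for y in range(height):
--         for x in range(width):
--             red_bytes = hex_list[(y*width)+x+offset]
--             green_bytes = hex_list[(y*width)+x+offset+1]
--             blue_bytes = hex_list[(y*width)+x+offset+2]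
--             red_hex = bytes_to_hex_color(red_bytes)
--             green_hex = bytes_to_hex_color(green_bytes)
--             blue_hex = bytes_to_hex_color(blue_bytes)
--             colorcode = f"#{red_hex}{green_hex}{blue_hex}"
--             offset+=2
--             colorMatrix[y][x] = colorcode
--     return colorMatrix
-- ===== SOURCE B (Python) =====
-- def _h(byte):
--     s = hex(byte * 4)[2:]
--     return s if len(s) > 1 else "0" + s
--
--
-- def form_frame_by_hex_set(width, height, hex_list):
--     flat = [
--         "#" + _h(hex_list[3 * n]) + _h(hex_list[3 * n + 1]) + _h(hex_list[3 * n + 2])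
--         for n in range(max(width, 0) * max(height, 0))
--     ]
--     return [flat[y * width:(y + 1) * width] for y in range(height)]
-- ===== Notes on version B (the rewrite author's own statement) =====
-- stated objective: simpler
-- what changed: Replaces the nested 2D loop with a running offset and in-place cell assignment by a single flat comprehension indexing at stride 3n plus a slice-based reshape into rows.
import Mathlib
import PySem

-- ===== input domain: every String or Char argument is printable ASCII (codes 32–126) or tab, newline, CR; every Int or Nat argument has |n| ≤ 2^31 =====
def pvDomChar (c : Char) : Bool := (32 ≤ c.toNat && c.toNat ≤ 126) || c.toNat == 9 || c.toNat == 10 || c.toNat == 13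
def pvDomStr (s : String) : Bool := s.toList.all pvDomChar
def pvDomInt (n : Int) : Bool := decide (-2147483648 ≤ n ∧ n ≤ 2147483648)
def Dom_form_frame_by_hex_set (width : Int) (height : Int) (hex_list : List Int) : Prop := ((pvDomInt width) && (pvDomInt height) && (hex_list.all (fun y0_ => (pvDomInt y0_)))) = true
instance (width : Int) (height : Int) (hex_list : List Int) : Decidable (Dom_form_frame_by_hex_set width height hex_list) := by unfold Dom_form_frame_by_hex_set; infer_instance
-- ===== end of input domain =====

-- ===== PORT A =====
-- B re-implements A with a flat stride-3 comprehension plus a slice reshape instead of A's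
-- nested loop with a running offset; equivalence of the return value is proved under Pre_.

-- hex digit characters (exact for Python's hex() digits)
def pvHexDigit (n : Nat) : Char := if n < 10 then Char.ofNat (48 + n) else Char.ofNat (87 + n)

-- hex digits of a positive Nat, most significant first (exact: Python's hex(n) for n > 0 is "0x" ++ these)
def pvHexAux (n : Nat) : List Char :=
  if h0 : n = 0 then [] else pvHexAux (n / 16) ++ [pvHexDigit (n % 16)]
decreasing_by exact Nat.div_lt_self (Nat.pos_of_ne_zero h0) (by omega)

def pvHexChars (n : Nat) : List Char := if n = 0 then ['0'] else pvHexAux n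

-- hex(v)[2:] : for v >= 0 Python's hex gives "0x"+digits so [2:] is the digits;
-- for v < 0 it gives "-0x"+digits so [2:] is 'x' followed by the digits (exact hand port)
def pvHexTail (v : Int) : List Char :=
  if v < 0 then 'x' :: pvHexChars v.natAbs else pvHexChars v.toNat

-- port of bytes_to_hex_color (on List Char; callers wrap with String.ofList)
def bytes_to_hex_color (byte : Int) : List Char :=
  let out_hex := pvHexTail (byte * 4)
  if out_hex.length = 1 then '0' :: out_hex else out_hex

-- port of A; the Python inits the matrix with int 0 placeholders that are all overwritten
-- before being read or returned, so the port uses "" as the placeholder; hex_list[i] is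
-- pyGetD (exact under Pre_, which puts every accessed index in range)
def form_frame_by_hex_set (width : Int) (height : Int) (hex_list : List Int) : List (List String) :=
  let colorMatrix : List (List String) :=
    (PySem.List.pyRange 0 height 1).map (fun _ => (PySem.List.pyRange 0 width 1).map (fun _ => ""))
  let fin :=
    (PySem.List.pyRange 0 height 1).foldl (fun (st : List (List String) × Int) y =>
      (PySem.List.pyRange 0 width 1).foldl (fun (st : List (List String) × Int) x =>
        let idx := y * width + x + st.2
        let red_bytes := PySem.List.pyGetD hex_list idx 0
        let green_bytes := PySem.List.pyGetD hex_list (idx + 1) 0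
        let blue_bytes := PySem.List.pyGetD hex_list (idx + 2) 0
        let colorcode := String.ofList ('#' :: (bytes_to_hex_color red_bytes ++ bytes_to_hex_color green_bytes ++ bytes_to_hex_color blue_bytes))
        (st.1.set y.toNat ((st.1.getD y.toNat []).set x.toNat colorcode), st.2 + 2)) st)
      (colorMatrix, 0)
  fin.1

-- ===== PORT B =====
def form_frame_by_hex_set_alt (width : Int) (height : Int) (hex_list : List Int) : List (List String) :=
  let flat :=
    (PySem.List.pyRange 0 (max width 0 * max height 0) 1).map (fun n =>
      String.ofList ('#' :: (bytes_to_hex_color (PySem.List.pyGetD hex_list (3 * n) 0) ++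
                         bytes_to_hex_color (PySem.List.pyGetD hex_list (3 * n + 1) 0) ++
                         bytes_to_hex_color (PySem.List.pyGetD hex_list (3 * n + 2) 0))))
  (PySem.List.pyRange 0 height 1).map (fun y =>
    PySem.List.slice flat (some (y * width)) (some ((y + 1) * width)))

-- ===== PRECONDITION & SPEC =====
-- Pre_ excludes exactly the inputs on which the Python A raises IndexError
-- (both dimensions positive but hex_list shorter than 3*width*height).
def Pre_form_frame_by_hex_set (width : Int) (height : Int) (hex_list : List Int) : Prop :=
  height ≤ 0 ∨ width ≤ 0 ∨ 3 * width * height ≤ (hex_list.length : Int)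
instance (width : Int) (height : Int) (hex_list : List Int) : Decidable (Pre_form_frame_by_hex_set width height hex_list) := by unfold Pre_form_frame_by_hex_set; infer_instance
def pvWitness_form_frame_by_hex_set : Int × Int × List Int := (2, 1, [0, 1, 2, 3, 100, 63])

def Spec_form_frame_by_hex_set (width : Int) (height : Int) (hex_list : List Int) (out : List (List String)) : Prop := out = form_frame_by_hex_set_alt width height hex_list
instance (width : Int) (height : Int) (hex_list : List Int) (out : List (List String)) : Decidable (Spec_form_frame_by_hex_set width height hex_list out) := by unfold Spec_form_frame_by_hex_set; infer_instance

-- ===== CLAIM (what is proved, stated in full; the proofs are below) =====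
def Claim_equal_form_frame_by_hex_set : Prop := ∀ (width : Int) (height : Int) (hex_list : List Int), Dom_form_frame_by_hex_set width height hex_list → Pre_form_frame_by_hex_set width height hex_list → Spec_form_frame_by_hex_set width height hex_list (form_frame_by_hex_set width height hex_list)

-- ===== LEMMAS AND PROOFS =====

-- the colour code written for flat position i (both programs build exactly this string)
def pvCell (hl : List Int) (i : Int) : String :=
  String.ofList ('#' :: (bytes_to_hex_color (PySem.List.pyGetD hl i 0) ++
                     bytes_to_hex_color (PySem.List.pyGetD hl (i + 1) 0) ++
                     bytes_to_hex_color (PySem.List.pyGetD hl (i + 2) 0)))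

lemma pvCell_fold (hl : List Int) (i : Int) :
    String.ofList ('#' :: (bytes_to_hex_color (PySem.List.pyGetD hl i 0) ++
                       bytes_to_hex_color (PySem.List.pyGetD hl (i + 1) 0) ++
                       bytes_to_hex_color (PySem.List.pyGetD hl (i + 2) 0))) = pvCell hl i := rfl

-- the row list after A's inner loop has run n steps starting from row r with base index `base`
def pvRowAfter (c : Int → String) (base : Int) (r : List String) : Nat → List String
  | 0 => r
  | n + 1 => (pvRowAfter c base r n).set n (c (base + 3 * n))

lemma pvRowAfter_eq (c : Int → String) (base : Int) (r : List String) (n : Nat)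
    (h : n ≤ r.length) :
    pvRowAfter c base r n = (List.range n).map (fun (x : Nat) => c (base + 3 * (x : Int))) ++ r.drop n := by
  induction n with
  | zero => simp [pvRowAfter]
  | succ n ih =>
    rw [pvRowAfter, ih (by omega), List.range_succ, List.map_append,
      List.drop_eq_getElem_cons (show n < r.length by omega)]
    rw [List.set_append_right _ _ (by simp),
      show ∀ z, z - (List.map (fun (x : Nat) => c (base + 3 * (x : Int))) (List.range n)).length = z - n by simp]
    simp only [Nat.sub_self, List.set_cons_zero, List.map_cons, List.map_nil]
    simp [List.append_assoc]

-- A's inner loop: writes cells 0..n-1 of row j and advances the offset by 2 each step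
lemma pvInner (c : Int → String) (y w : Int) (j : Nat) (n : Nat) :
    ∀ (m : List (List String)) (off : Int), j < m.length →
    (List.range n).foldl
      (fun (st : List (List String) × Int) (x : Nat) =>
        (st.1.set j ((st.1.getD j []).set x (c (y * w + (x : Int) + st.2))), st.2 + 2)) (m, off)
    = (m.set j (pvRowAfter c (y * w + off) (m.getD j []) n), off + 2 * n) := by
  induction n with
  | zero =>
    intro m off hj
    simp only [List.range_zero, List.foldl_nil, pvRowAfter, Nat.cast_zero, mul_zero, add_zero]
    simp [List.getD, List.getElem?_eq_getElem hj]
  | succ n ih =>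
    intro m off hj
    rw [List.range_succ, List.foldl_append, ih m off hj]
    simp only [List.foldl_cons, List.foldl_nil, pvRowAfter]
    refine Prod.ext ?_ ?_
    · rw [List.set_set,
        show (m.set j (pvRowAfter c (y * w + off) (m.getD j []) n)).getD j []
            = pvRowAfter c (y * w + off) (m.getD j []) n by
          simp [List.getD, List.getElem?_set_self hj],
        show y * w + (n : Int) + (off + 2 * (n : Int)) = y * w + off + 3 * (n : Int) by ring]
    · show off + 2 * (n:Int) + 2 = off + 2 * ((n+1 : Nat) : Int)
      push_cast; ring

-- A's outer loop on the all-placeholder matrix: after n rows, rows 0..n-1 hold the final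
-- colour codes for flat positions 3*(j*W+x) and the offset is 2*W*n
lemma pvOuter (c : Int → String) (w : Int) (W : Nat) (hw : w = (W : Int)) (H : Nat) :
    ∀ (n : Nat), n ≤ H →
    (List.range n).foldl
      (fun (st : List (List String) × Int) (j : Nat) =>
        (List.range W).foldl
          (fun (st : List (List String) × Int) (x : Nat) =>
            (st.1.set j ((st.1.getD j []).set x (c ((j : Int) * w + (x : Int) + st.2))), st.2 + 2)) st)
      (List.replicate H (List.replicate W ""), 0)
    = ((List.range n).map (fun (j : Nat) => (List.range W).map (fun (x : Nat) => c (3 * ((j : Int) * w + (x : Int))))) ++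
        List.replicate (H - n) (List.replicate W ""), 2 * (W : Int) * n) := by
  intro n
  induction n with
  | zero => simp
  | succ n ih =>
    intro hn
    rw [List.range_succ, List.foldl_append, ih (by omega)]
    simp only [List.foldl_cons, List.foldl_nil]
    rw [pvInner c (n : Int) w n W _ _ (by simp; omega)]
    have hget : (((List.range n).map (fun (j : Nat) => (List.range W).map (fun (x : Nat) => c (3 * ((j : Int) * w + (x : Int)))))
        ++ List.replicate (H - n) (List.replicate W "")).getD n []) = List.replicate W "" := by
      rw [List.getD, List.getElem?_append_right (by simp), List.getElem?_eq_getElem (by simp; omega)]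
      simp
    rw [hget, pvRowAfter_eq _ _ _ _ (by simp)]
    refine Prod.ext ?_ ?_
    · dsimp only
      rw [List.set_append_right _ _ (by simp),
        show ∀ z, z - ((List.range n).map (fun (j : Nat) => (List.range W).map (fun (x : Nat) => c (3 * ((j : Int) * w + (x : Int)))))).length = z - n by simp]
      rw [show H - n = (H - (n+1)) + 1 by omega, List.replicate_succ, Nat.sub_self, List.set_cons_zero]
      rw [List.map_append]
      simp only [List.map_cons, List.map_nil, List.append_assoc, List.drop_replicate,
        Nat.sub_self, List.replicate_zero, List.append_nil, List.cons_append, List.nil_append]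
      congr 2
      apply List.map_congr_left
      intro x _
      congr 1
      rw [hw]
      ring
    · dsimp only
      push_cast; ring

-- a fold whose body ignores the element (A's outer loop when width ≤ 0)
lemma pvFoldlConst {α β : Type} (l : List β) (i : α) : l.foldl (fun s _ => s) i = i := by
  induction l generalizing i with
  | nil => rfl
  | cons b l ih => exact ih i

-- ===== VERDICT (by name: the statement is the Claim_ definition above) =====
theorem form_frame_by_hex_set_spec : Claim_equal_form_frame_by_hex_set := by
  intro width height hex_list _dom hpre
  unfold Spec_form_frame_by_hex_set
  simp only [form_frame_by_hex_set, form_frame_by_hex_set_alt, pvCell_fold]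
  by_cases hh : height ≤ 0
  · rw [PySem.List.pyRange_one_eq_nil hh]
    simp
  · push Not at hh
    by_cases hwle : width ≤ 0
    · -- width ≤ 0, height > 0: every row is empty on both sides
      rw [PySem.List.pyRange_one_eq_nil hwle,
        show max width 0 * max height 0 = 0 by rw [max_eq_right hwle]; ring,
        PySem.List.pyRange_one_eq_nil le_rfl]
      simp only [List.map_nil, List.foldl_nil, pvFoldlConst]
      apply List.map_congr_left
      intro y _
      simp [PySem.List.slice]
    · push Not at hwle
      -- main case: width > 0 and height > 0
      obtain ⟨W, hW⟩ : ∃ W : Nat, width = (W : Int) := ⟨width.toNat, (Int.toNat_of_nonneg (by omega)).symm⟩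
      obtain ⟨H, hH⟩ : ∃ H : Nat, height = (H : Int) := ⟨height.toNat, (Int.toNat_of_nonneg (by omega)).symm⟩
      subst hW hH
      rw [show max (W : Int) 0 * max (H : Int) 0 = ((W * H : Nat) : Int) by
            rw [max_eq_left (by omega), max_eq_left (by omega)]; push_cast; ring]
      rw [PySem.List.pyRange_zero_natCast, PySem.List.pyRange_zero_natCast, PySem.List.pyRange_zero_natCast]
      simp only [List.foldl_map, List.map_map, Function.comp_def, Int.toNat_natCast, List.map_const', List.length_range]
      rw [pvOuter (pvCell hex_list) (W : Int) W rfl H H le_rfl]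
      simp only [Nat.sub_self, List.replicate_zero, List.append_nil]
      apply List.map_congr_left
      intro j hj
      rw [List.mem_range] at hj
      have hjW : j * W + W ≤ W * H := by
        calc j * W + W = W * (j + 1) := by ring
        _ ≤ W * H := Nat.mul_le_mul_left W (by omega)
      rw [show ((j : Int)) * (W : Int) = ((j * W : Nat) : Int) by push_cast; ring,
        show ((j : Int) + 1) * (W : Int) = ((j * W + W : Nat) : Int) by push_cast; ring,
        PySem.List.slice_natCast]
      rw [show j * W + W - j * W = W by omega]
      apply List.ext_getElem
      · simp
        omega
      · intro i h1 h2
        simp only [List.getElem_map, List.getElem_range, List.getElem_take, List.getElem_drop]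
        congr 1
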